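-- pv_equiv track=rewrite | github.com/thomas-westfall/assignments-12700 | 09/scrabble.py | score
-- ===== SOURCE A (Python) =====
-- def score(w):
--     ans = 0
--     ones = "aeioulnrst"
--     twos = "dg"
--     threes = "bcmp"
--     fours = "fhvwy"
--     fives = "k"
--     eights = "jx"
--     tens = "qz"
--
--     for x in w:
--         if x in ones:
--             ans = ans + 1
--         if x in twos:
--             ans = ans + 2
--         if x in threes:
--             ans = ans + 3
--         if x in fours:
--             ans = ans + 4
--         if x in fives:
--             ans = ans + 5
--         if x in eights:
--             ans = ans + 8
--         if x in tens:
--             ans = ans + 10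
--
--     return ans
-- ===== SOURCE B (Python) =====
-- def score(w):
--     groups = [("aeioulnrst", 1), ("dg", 2), ("bcmp", 3), ("fhvwy", 4),
--               ("k", 5), ("jx", 8), ("qz", 10)]
--     return sum(w.count(c) * p for letters, p in groups for c in letters)
-- ===== Notes on version B (the rewrite author's own statement) =====
-- stated objective: alternative
-- what changed: Inverts the traversal: instead of walking the word and testing each character against seven category strings, B iterates over the 26 scoring letters and sums count-of-letter-in-word times its point value; correct because addition commutes and each letter lies in exactly one category.
import Mathlib
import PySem

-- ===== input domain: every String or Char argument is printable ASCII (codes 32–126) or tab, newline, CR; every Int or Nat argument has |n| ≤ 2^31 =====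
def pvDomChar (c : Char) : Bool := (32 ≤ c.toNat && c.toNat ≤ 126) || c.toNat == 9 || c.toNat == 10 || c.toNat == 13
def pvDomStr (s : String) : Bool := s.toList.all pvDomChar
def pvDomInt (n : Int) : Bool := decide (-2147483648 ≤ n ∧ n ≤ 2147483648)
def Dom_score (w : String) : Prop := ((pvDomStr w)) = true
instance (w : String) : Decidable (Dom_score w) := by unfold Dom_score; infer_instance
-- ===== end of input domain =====

-- B inverts the traversal: it iterates over the 26 scoring letters and sums count-in-word × points, instead of A's walk over the word with seven membership tests per character (alternative decomposition, same cost).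
-- ===== PORT A =====
-- Literal port of A: accumulator loop over the word, seven independent membership checks per char.
def score (w : String) : Int :=
  w.toList.foldl (fun ans x =>
    let ans := if "aeioulnrst".toList.contains x then ans + 1 else ans
    let ans := if "dg".toList.contains x then ans + 2 else ans
    let ans := if "bcmp".toList.contains x then ans + 3 else ans
    let ans := if "fhvwy".toList.contains x then ans + 4 else ans
    let ans := if "k".toList.contains x then ans + 5 else ans
    let ans := if "jx".toList.contains x then ans + 8 else ans
    let ans := if "qz".toList.contains x then ans + 10 else ans
    ans) 0

-- ===== PORT B =====
-- B: loop over the scoring letters; w.count(c) for a single-char c is exactly List.count on w.toList.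
def scoreGroups : List (String × Int) :=
  [("aeioulnrst", 1), ("dg", 2), ("bcmp", 3), ("fhvwy", 4), ("k", 5), ("jx", 8), ("qz", 10)]

def score_alt (w : String) : Int :=
  (scoreGroups.flatMap (fun gp =>
    gp.1.toList.map (fun c => (w.toList.count c : Int) * gp.2))).sum

-- ===== PRECONDITION & SPEC =====
def Spec_score (w : String) (out : Int) : Prop := out = score_alt w
instance (w : String) (out : Int) : Decidable (Spec_score w out) := by unfold Spec_score; infer_instance

-- ===== CLAIM (what is proved, stated in full; the proofs are below) =====
def Claim_equal_score : Prop := ∀ (w : String), Dom_score w → Spec_score w (score w)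

-- ===== LEMMAS AND PROOFS =====

-- A's per-character contribution, as a pure function of the character.
def charPts (x : Char) : Int :=
  (if "aeioulnrst".toList.contains x then 1 else 0)
  + (if "dg".toList.contains x then 2 else 0)
  + (if "bcmp".toList.contains x then 3 else 0)
  + (if "fhvwy".toList.contains x then 4 else 0)
  + (if "k".toList.contains x then 5 else 0)
  + (if "jx".toList.contains x then 8 else 0)
  + (if "qz".toList.contains x then 10 else 0)

theorem step_eq (ans : Int) (x : Char) :
    (let a1 := if "aeioulnrst".toList.contains x then ans + 1 else ans
     let a2 := if "dg".toList.contains x then a1 + 2 else a1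
     let a3 := if "bcmp".toList.contains x then a2 + 3 else a2
     let a4 := if "fhvwy".toList.contains x then a3 + 4 else a3
     let a5 := if "k".toList.contains x then a4 + 5 else a4
     let a6 := if "jx".toList.contains x then a5 + 8 else a5
     let a7 := if "qz".toList.contains x then a6 + 10 else a6
     a7) = ans + charPts x := by
  simp only [charPts]
  split_ifs <;> omega

-- The flat list of (letter, points) pairs B's comprehension ranges over.
def pairs : List (Char × Int) :=
  scoreGroups.flatMap (fun gp => gp.1.toList.map (fun c => (c, gp.2)))

theorem pairs_eq : pairs =
    [('a', 1), ('e', 1), ('i', 1), ('o', 1), ('u', 1), ('l', 1), ('n', 1), ('r', 1), ('s', 1), ('t', 1),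
     ('d', 2), ('g', 2), ('b', 3), ('c', 3), ('m', 3), ('p', 3), ('f', 4), ('h', 4), ('v', 4), ('w', 4),
     ('y', 4), ('k', 5), ('j', 8), ('x', 8), ('q', 10), ('z', 10)] := by decide

set_option maxHeartbeats 1000000 in
-- Per character: the sum of the pair-table entries matching x is A's per-character contribution.
theorem pairs_pick (x : Char) :
    ((pairs.map (fun cp => if cp.1 == x then cp.2 else 0)).sum) = charPts x := by
  by_cases hx : x ∈ ['a','e','i','o','u','l','n','r','s','t','d','g','b','c','m','p','f','h','v','w','y','k','j','q','z','x']
  · simp only [List.mem_cons, List.not_mem_nil, or_false] at hx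
    rcases hx with rfl|rfl|rfl|rfl|rfl|rfl|rfl|rfl|rfl|rfl|rfl|rfl|rfl|rfl|rfl|rfl|rfl|rfl|rfl|rfl|rfl|rfl|rfl|rfl|rfl|rfl <;> decide
  · simp only [List.mem_cons, List.not_mem_nil, or_false, not_or] at hx
    obtain ⟨h1,h2,h3,h4,h5,h6,h7,h8,h9,h10,h11,h12,h13,h14,h15,h16,h17,h18,h19,h20,h21,h22,h23,h24,h25,h26⟩ := hx
    simp [charPts, pairs_eq, Ne.symm h1, Ne.symm h2, Ne.symm h3, Ne.symm h4, Ne.symm h5, Ne.symm h6, Ne.symm h7, Ne.symm h8, Ne.symm h9, Ne.symm h10, Ne.symm h11, Ne.symm h12, Ne.symm h13, Ne.symm h14, Ne.symm h15, Ne.symm h16, Ne.symm h17, Ne.symm h18, Ne.symm h19, Ne.symm h20, Ne.symm h21, Ne.symm h22, Ne.symm h23, Ne.symm h24, Ne.symm h25, Ne.symm h26, h1, h2, h3, h4, h5, h6, h7, h8, h9, h10, h11, h12, h13, h14, h15, h16, h17, h18, h19, h20, h21, h22, h23, h24, h25, h26]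

-- Exchange of summation: sum over the pair table of count × points = sum over the word of charPts.
theorem exchange (l : List Char) :
    (pairs.map (fun cp => (l.count cp.1 : Int) * cp.2)).sum = (l.map charPts).sum := by
  induction l with
  | nil => simp
  | cons x t ih =>
    have hmap : (pairs.map (fun cp => ((x :: t).count cp.1 : Int) * cp.2)) =
        (pairs.map (fun cp => ((t.count cp.1 : Int) * cp.2) + (if cp.1 == x then cp.2 else 0))) := by
      apply List.map_congr_left
      intro cp _
      rw [List.count_cons]
      push_cast
      by_cases h : cp.1 = x
      · subst h; simp; ring
      · simp [h, Ne.symm h]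
    rw [hmap, List.sum_map_add, ih, pairs_pick]
    simp [List.map_cons]
    ring

-- ===== VERDICT (by name: the statement is the Claim_ definition above) =====
theorem score_spec : Claim_equal_score := by
  intro w _
  unfold Spec_score score score_alt
  rw [show (fun ans x =>
    let a1 := if "aeioulnrst".toList.contains x then ans + 1 else ans
    let a2 := if "dg".toList.contains x then a1 + 2 else a1
    let a3 := if "bcmp".toList.contains x then a2 + 3 else a2
    let a4 := if "fhvwy".toList.contains x then a3 + 4 else a3
    let a5 := if "k".toList.contains x then a4 + 5 else a4
    let a6 := if "jx".toList.contains x then a5 + 8 else a5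
    let a7 := if "qz".toList.contains x then a6 + 10 else a6
    a7) = (fun ans x => ans + charPts x) from funext fun a => funext fun x => step_eq a x]
  rw [PySem.List.foldl_add w.toList charPts 0]
  rw [show (scoreGroups.flatMap (fun gp => gp.1.toList.map (fun c => (w.toList.count c : Int) * gp.2)))
      = pairs.map (fun cp => (w.toList.count cp.1 : Int) * cp.2) by
    simp [pairs, List.map_flatMap, List.map_map, Function.comp_def]]
  rw [exchange]
  ring
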